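-- pv_equiv track=rewrite | github.com/tianfu-1/online-gamebox | scripts/build-games-from-xlsx.py | ensure_bounds
-- ===== SOURCE A (Python) =====
-- from typing import List
--
-- def ensure_bounds(text: str, min_words: int, max_words: int, fillers: List[str]) -> str:
--     words = text.split()
--     if len(words) > max_words:
--         trimmed = " ".join(words[:max_words])
--         if not trimmed.endswith("."):
--             trimmed += "."
--         return trimmed
--     idx = 0
--     while len(words) < min_words:
--         if idx >= len(fillers):
--             idx = 0
--         text = f"{text} {fillers[idx]}"
--         words = text.split()
--         idx += 1
--     if len(words) > max_words:
--         return ensure_bounds(text, min_words, max_words, fillers)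
--     return text
-- ===== SOURCE B (Python) =====
-- def ensure_bounds(text: str, min_words: int, max_words: int, fillers: list) -> str:
--     # Arithmetic approach: instead of appending fillers one at a time until the
--     # word count reaches min_words, compute with divmod over one filler cycle
--     # exactly how many fillers are needed, build the padding in one join, and
--     # trim once at the end.
--     words = text.split()
--     n = len(words)
--     if n > max_words:
--         out = " ".join(words[:max_words])
--         return out if out.endswith(".") else out + "."
--     if n >= min_words:
--         return text
--     counts = [len(f.split()) for f in fillers]
--     cycle = sum(counts)
--     q, r = divmod(min_words - n - 1, cycle)
--     rem = r + 1
--     acc = 0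
--     j = 0
--     while acc < rem:
--         acc += counts[j]
--         j += 1
--     pad = fillers * q + fillers[:j]
--     text = text + " " + " ".join(pad)
--     if n + q * cycle + acc <= max_words:
--         return text
--     out = " ".join(text.split()[:max_words])
--     return out if out.endswith(".") else out + "."
-- ===== Notes on version B (the rewrite author's own statement) =====
-- stated objective: faster
-- what changed: B replaces A's append-one-filler-and-resplit-until-long-enough loop entirely: it computes per-filler word counts once, uses divmod over the cycle total to determine arithmetically how many whole filler cycles plus which prefix of one cycle are needed, builds the padding with one list multiplication and one join, and trims once at the end.
import Mathlib
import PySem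

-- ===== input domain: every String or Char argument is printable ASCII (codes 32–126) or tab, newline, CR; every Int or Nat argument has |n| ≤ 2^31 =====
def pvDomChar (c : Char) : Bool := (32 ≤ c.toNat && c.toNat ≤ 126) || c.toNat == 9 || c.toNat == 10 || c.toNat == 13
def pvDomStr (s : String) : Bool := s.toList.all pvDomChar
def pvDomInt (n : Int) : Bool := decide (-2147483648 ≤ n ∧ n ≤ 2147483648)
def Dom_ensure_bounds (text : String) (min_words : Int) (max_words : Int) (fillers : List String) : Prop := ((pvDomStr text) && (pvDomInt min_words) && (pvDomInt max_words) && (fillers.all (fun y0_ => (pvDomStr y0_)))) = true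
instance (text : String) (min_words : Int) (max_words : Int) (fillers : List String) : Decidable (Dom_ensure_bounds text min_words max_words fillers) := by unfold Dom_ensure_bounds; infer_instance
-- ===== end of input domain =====

-- ===== PORT A =====
-- header: B computes the number of needed fillers arithmetically (divmod over one filler cycle) and pads with a single join, instead of A's append-one-filler-and-resplit loop; return values agree on Pre_.
-- fuel guards only totalize A's while loop / tail recursion: under Pre_ the loop needs at most (min_words+1)*(len fillers+1) steps and the recursion depth is at most 2.
def ensureLoopA (min_words : Int) (fillers : List String) : Nat → String → Int → String
  | 0, text, _ => text
  | fuel+1, text, idx =>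
    if ((PySem.Str.split₀ text).length : Int) < min_words then
      let idx' := if (fillers.length : Int) ≤ idx then 0 else idx
      match PySem.List.pyGet? fillers idx' with
      | none => text
      | some f => ensureLoopA min_words fillers fuel (text ++ " " ++ f) (idx' + 1)
    else text

def ensureGoA : Nat → String → Int → Int → List String → String
  | 0, text, _, _, _ => text
  | depth+1, text, min_words, max_words, fillers =>
    let words := PySem.Str.split₀ text
    if ((words.length : Int)) > max_words then
      let trimmed := PySem.Str.join " " (PySem.List.slice words none (some max_words))
      if !(PySem.Str.endswith trimmed ".") then trimmed ++ "." else trimmed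
    else
      let text' := ensureLoopA min_words fillers ((min_words.toNat + 1) * (fillers.length + 1)) text 0
      if ((PySem.Str.split₀ text').length : Int) > max_words then
        ensureGoA depth text' min_words max_words fillers
      else text'

def ensure_bounds (text : String) (min_words : Int) (max_words : Int) (fillers : List String) : String :=
  ensureGoA 2 text min_words max_words fillers

-- ===== PORT B =====
-- `while acc < rem: acc += counts[j]; j += 1` — structural recursion over counts
-- (under Pre_ the loop never runs past the end of counts; [] case only totalizes it)
def scanB : List Int → Int → Int → Int → Int × Int
  | [], _, acc, j => (acc, j)
  | c :: cs, rem, acc, j => if acc < rem then scanB cs rem (acc + c) (j + 1) else (acc, j)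

def trimB (text : String) (max_words : Int) : String :=
  let out := PySem.Str.join " " (PySem.List.slice (PySem.Str.split₀ text) none (some max_words))
  if PySem.Str.endswith out "." then out else out ++ "."

def ensure_bounds_alt (text : String) (min_words : Int) (max_words : Int) (fillers : List String) : String :=
  let words := PySem.Str.split₀ text
  let n : Int := (words.length : Int)
  if n > max_words then trimB text max_words
  else if n ≥ min_words then text
  else
    let counts := fillers.map (fun f => ((PySem.Str.split₀ f).length : Int))
    let cycle := counts.sum
    match PySem.Int.divmod? (min_words - n - 1) cycle with
    | none => text  -- cycle = 0: Python raises ZeroDivisionError here; excluded by Pre_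
    | some qr =>
      let q := qr.1
      let rem := qr.2 + 1
      let aj := scanB counts rem 0 0
      let pad := PySem.List.pyRepeat fillers q ++ PySem.List.slice fillers none (some aj.2)
      let text' := text ++ " " ++ PySem.Str.join " " pad
      if n + q * cycle + aj.1 ≤ max_words then text' else trimB text' max_words

-- ===== PRECONDITION & SPEC =====
-- Pre_ excludes exactly the inputs where Python A's padding loop must run but cannot finish:
-- fillers is empty (A raises IndexError) or every filler is whitespace-only (A loops forever).
def Pre_ensure_bounds (text : String) (min_words : Int) (max_words : Int) (fillers : List String) : Prop :=
  min_words ≤ ((PySem.Str.split₀ text).length : Int) ∨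
  max_words < ((PySem.Str.split₀ text).length : Int) ∨
  ∃ f ∈ fillers, PySem.Str.split₀ f ≠ []

instance (text : String) (min_words : Int) (max_words : Int) (fillers : List String) : Decidable (Pre_ensure_bounds text min_words max_words fillers) := by unfold Pre_ensure_bounds; infer_instance

def pvWitness_ensure_bounds : String × Int × Int × List String := ("hello world", 4, 6, ["pad text."])

def Spec_ensure_bounds (text : String) (min_words : Int) (max_words : Int) (fillers : List String) (out : String) : Prop := out = ensure_bounds_alt text min_words max_words fillers
instance (text : String) (min_words : Int) (max_words : Int) (fillers : List String) (out : String) : Decidable (Spec_ensure_bounds text min_words max_words fillers out) := by unfold Spec_ensure_bounds; infer_instance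

-- ===== CLAIM (what is proved, stated in full; the proofs are below) =====
def Claim_equal_ensure_bounds : Prop := ∀ (text : String) (min_words : Int) (max_words : Int) (fillers : List String), Dom_ensure_bounds text min_words max_words fillers → Pre_ensure_bounds text min_words max_words fillers → Spec_ensure_bounds text min_words max_words fillers (ensure_bounds text min_words max_words fillers)

-- ===== LEMMAS AND PROOFS =====

-- word count of one string, the word-count prefix machinery used by the proofs
def wcW (f : String) : Nat := (PySem.Str.split₀ f).length

-- A's loop appends fillers one by one: fold of single appends
def appendPad (text : String) (l : List String) : String := l.foldl (fun t f => t ++ " " ++ f) text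

-- the first s fillers of the cyclic sequence starting at index r
def cycTake (fillers : List String) : Nat → Nat → List String
  | _, 0 => []
  | r, s+1 => fillers.getD r "" :: cycTake fillers ((r+1) % fillers.length) s

-- Nat-level model of scanB: (final acc, number of entries consumed)
def firstJ : List Nat → Int → Nat → Nat × Nat
  | [], _, acc => (acc, 0)
  | c :: cs, rem, acc =>
    if (acc : Int) < rem then
      let p := firstJ cs rem (acc + c)
      (p.1, p.2 + 1)
    else (acc, 0)

-- split₀.go with a nonempty accumulator just prepends the flushed words
theorem split0_go_acc (s cur : List Char) (acc : List (List Char)) :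
    PySem.Chars.split₀.go s cur acc = acc.reverse ++ PySem.Chars.split₀.go s cur [] := by
  induction s generalizing cur acc with
  | nil =>
    simp only [PySem.Chars.split₀.go]
    by_cases h : cur.isEmpty <;> simp [h]
  | cons c rest ih =>
    simp only [PySem.Chars.split₀.go]
    by_cases hs : PySem.Chars.isspace c
    · by_cases h : cur.isEmpty
      · simp only [hs, h, if_true]
        exact ih [] acc
      · simp only [hs, h, if_true, Bool.false_eq_true, if_false]
        rw [ih [] (cur.reverse :: acc), ih [] [cur.reverse]]
        simp
    · simp only [hs, Bool.false_eq_true, if_false]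
      exact ih _ _

-- splitting at an explicit blank concatenates the word lists
theorem split0_go_append (b : List Char) :
    ∀ (a cur : List Char),
      PySem.Chars.split₀.go (a ++ ' ' :: b) cur [] =
        PySem.Chars.split₀.go a cur [] ++ PySem.Chars.split₀.go b [] [] := by
  intro a
  induction a with
  | nil =>
    intro cur
    simp only [List.nil_append, PySem.Chars.split₀.go]
    have hsp : PySem.Chars.isspace ' ' = true := by decide
    by_cases h : cur.isEmpty <;> simp [hsp, h, split0_go_acc b [] [cur.reverse]]
  | cons c rest ih =>
    intro cur
    simp only [List.cons_append, PySem.Chars.split₀.go]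
    by_cases hs : PySem.Chars.isspace c
    · by_cases h : cur.isEmpty
      · simp only [hs, h, if_true]
        exact ih []
      · simp only [hs, h, if_true, Bool.false_eq_true, if_false]
        rw [split0_go_acc (rest ++ ' ' :: b) [] [cur.reverse],
            split0_go_acc rest [] [cur.reverse], ih []]
        simp
    · simp only [hs, Bool.false_eq_true, if_false]
      exact ih (c :: cur)

theorem chars_split0_append (a b : List Char) :
    PySem.Chars.split₀ (a ++ ' ' :: b) = PySem.Chars.split₀ a ++ PySem.Chars.split₀ b := by
  simp only [PySem.Chars.split₀]
  exact split0_go_append b a []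

theorem str_split0_append (s f : String) :
    PySem.Str.split₀ (s ++ " " ++ f) = PySem.Str.split₀ s ++ PySem.Str.split₀ f := by
  have h : (s ++ " " ++ f).toList = s.toList ++ ' ' :: f.toList := by
    simp [String.toList_append]
  simp only [PySem.Str.split₀, h, chars_split0_append, List.map_append]

theorem wc_appendPad (l : List String) :
    ∀ t : String, (PySem.Str.split₀ (appendPad t l)).length
      = (PySem.Str.split₀ t).length + (l.map wcW).sum := by
  induction l with
  | nil => intro t; simp [appendPad]
  | cons f rest ih =>
    intro t
    have : appendPad t (f :: rest) = appendPad (t ++ " " ++ f) rest := rfl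
    rw [this, ih, str_split0_append]
    simp [wcW]
    omega

theorem join_single (f : String) : PySem.Str.join " " [f] = f := by
  apply String.toList_inj.mp
  simp [PySem.Str.join, PySem.Chars.join, List.intercalate]

theorem join_cons (f g : String) (l : List String) :
    PySem.Str.join " " (f :: g :: l) = f ++ " " ++ PySem.Str.join " " (g :: l) := by
  apply String.toList_inj.mp
  simp only [PySem.Str.join, List.map_cons, String.toList_ofList, String.toList_append]
  rw [PySem.Chars.join_cons_cons]

theorem appendPad_eq_join (l : List String) :
    ∀ (t f : String), appendPad t (f :: l) = t ++ " " ++ PySem.Str.join " " (f :: l) := by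
  induction l with
  | nil => intro t f; rw [join_single]; rfl
  | cons g rest ih =>
    intro t f
    have h1 : appendPad t (f :: g :: rest) = appendPad (t ++ " " ++ f) (g :: rest) := rfl
    rw [h1, ih, join_cons]
    simp [String.append_assoc]

theorem cycTake_small (fillers : List String) :
    ∀ (b r : Nat), r + b ≤ fillers.length →
      cycTake fillers r b = (fillers.drop r).take b := by
  intro b
  induction b with
  | zero => intro r _; simp [cycTake]
  | succ b ih =>
    intro r hr
    have hrlt : r < fillers.length := by omega
    have hget : fillers.getD r "" = fillers[r] := List.getD_eq_getElem fillers "" hrlt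
    rw [List.drop_eq_getElem_cons hrlt]
    simp only [cycTake]
    rw [hget]
    cases b with
    | zero =>
      simp only [cycTake, List.take_succ_cons, List.take_zero]
    | succ b' =>
      have hr1 : r + 1 < fillers.length := by omega
      have hmod : (r + 1) % fillers.length = r + 1 := Nat.mod_eq_of_lt hr1
      rw [hmod, ih (r+1) (by omega), List.take_succ_cons]

theorem cycTake_cycle (fillers : List String) (s : Nat) :
    ∀ (c r : Nat), r < fillers.length → c + r = fillers.length →
      cycTake fillers r (c + s) = fillers.drop r ++ cycTake fillers 0 s := by
  intro c
  induction c with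
  | zero => intro r hr hc; omega
  | succ c ih =>
    intro r hr hc
    have hget : fillers.getD r "" = fillers[r] := List.getD_eq_getElem fillers "" hr
    rw [List.drop_eq_getElem_cons hr]
    have harith : c + 1 + s = (c + s) + 1 := by omega
    rw [harith]
    simp only [cycTake]
    rw [hget]
    by_cases hc0 : c = 0
    · subst hc0
      have hr1 : r + 1 = fillers.length := by omega
      have hmod : (r + 1) % fillers.length = 0 := by rw [hr1]; exact Nat.mod_self _
      rw [hmod, Nat.zero_add, hr1, List.drop_length]
      simp
    · have hr1 : r + 1 < fillers.length := by omega
      have hmod : (r + 1) % fillers.length = r + 1 := Nat.mod_eq_of_lt hr1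
      rw [hmod, ih (r+1) hr1 (by omega), List.cons_append]

theorem cycTake_blocks (fillers : List String) (hm : 0 < fillers.length) :
    ∀ (a b : Nat), b ≤ fillers.length →
      cycTake fillers 0 (a * fillers.length + b)
        = (List.replicate a fillers).flatten ++ fillers.take b := by
  intro a
  induction a with
  | zero =>
    intro b hb
    have := cycTake_small fillers b 0 (by omega)
    simpa using this
  | succ a ih =>
    intro b hb
    have harith : (a+1) * fillers.length + b = fillers.length + (a * fillers.length + b) := by ring
    rw [harith, cycTake_cycle fillers (a * fillers.length + b) fillers.length 0 hm (by omega),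
        ih b hb, List.replicate_succ, List.flatten_cons]
    simp

theorem sum_wc_blocks (fillers : List String) (hm : 0 < fillers.length) (a b : Nat)
    (hb : b ≤ fillers.length) :
    ((cycTake fillers 0 (a * fillers.length + b)).map wcW).sum
      = a * (fillers.map wcW).sum + ((fillers.take b).map wcW).sum := by
  rw [cycTake_blocks fillers hm a b hb]
  simp only [List.map_append, List.sum_append, List.map_flatten, List.map_replicate]
  congr 1
  rw [List.sum_flatten, List.map_replicate, List.sum_replicate, smul_eq_mul]

theorem firstJ_le (l : List Nat) : ∀ (rem : Int) (acc : Nat), (firstJ l rem acc).2 ≤ l.length := by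
  induction l with
  | nil => intro rem acc; simp [firstJ]
  | cons c cs ih =>
    intro rem acc
    simp only [firstJ]
    split_ifs with h
    · simpa using Nat.succ_le_succ (ih rem (acc + c))
    · simp

theorem firstJ_acc (l : List Nat) :
    ∀ (rem : Int) (acc : Nat),
      (firstJ l rem acc).1 = acc + (l.take (firstJ l rem acc).2).sum := by
  induction l with
  | nil => intro rem acc; simp [firstJ]
  | cons c cs ih =>
    intro rem acc
    simp only [firstJ]
    split_ifs with h
    · simp only [List.take_succ_cons, List.sum_cons]
      rw [ih rem (acc + c)]
      omega
    · simp

theorem firstJ_ge (l : List Nat) :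
    ∀ (rem : Int) (acc : Nat), rem ≤ (acc : Int) + (l.sum : Int) →
      rem ≤ ((firstJ l rem acc).1 : Int) := by
  induction l with
  | nil =>
    intro rem acc h
    simp only [firstJ]
    simp at h
    omega
  | cons c cs ih =>
    intro rem acc h
    simp only [firstJ]
    split_ifs with hlt
    · have := ih rem (acc + c) (by
        simp only [List.sum_cons] at h
        push_cast at h ⊢
        omega)
      simpa using this
    · omega

theorem firstJ_min (l : List Nat) :
    ∀ (rem : Int) (acc : Nat) (j' : Nat), j' < (firstJ l rem acc).2 →
      (acc : Int) + ((l.take j').sum : Int) < rem := by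
  induction l with
  | nil => intro rem acc j' h; simp [firstJ] at h
  | cons c cs ih =>
    intro rem acc j' h
    simp only [firstJ] at h
    split_ifs at h with hlt
    · cases j' with
      | zero => simpa using hlt
      | succ j =>
        have := ih rem (acc + c) j (by simpa using h)
        simp only [List.take_succ_cons, List.sum_cons]
        push_cast at this ⊢
        omega
    · omega

theorem scanB_firstJ (l : List Nat) :
    ∀ (rem : Int) (acc : Nat) (j : Int),
      scanB (l.map (Nat.cast : Nat → Int)) rem (acc : Int) j
        = (((firstJ l rem acc).1 : Int), j + ((firstJ l rem acc).2 : Int)) := by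
  induction l with
  | nil => intro rem acc j; simp [scanB, firstJ]
  | cons c cs ih =>
    intro rem acc j
    rw [List.map_cons]
    simp only [scanB, firstJ]
    split_ifs with h
    · have hc : (acc : Int) + (c : Int) = ((acc + c : Nat) : Int) := by push_cast; ring
      rw [hc, ih rem (acc + c) (j + 1)]
      refine Prod.ext rfl ?_
      push_cast
      ring
    · simp

-- ensureLoopA normalizes idx = len(fillers) to 0 on its first step
theorem loopA_idx_m (min_words : Int) (fillers : List String) (fuel : Nat) (t : String) :
    ensureLoopA min_words fillers fuel t (fillers.length : Int)
      = ensureLoopA min_words fillers fuel t 0 := by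
  cases fuel with
  | zero => rfl
  | succ fuel =>
    simp only [ensureLoopA]
    have h1 : (if (fillers.length : Int) ≤ (fillers.length : Int) then (0:Int)
        else (fillers.length : Int)) = 0 := by simp
    have h2 : (if (fillers.length : Int) ≤ (0:Int) then (0:Int) else 0) = 0 := by
      split_ifs <;> rfl
    rw [h1, h2]

-- A's padding loop equals one bulk append of the cyclic filler prefix of minimal length
theorem loopA_pad (min_words : Int) (fillers : List String) :
    ∀ (s fuel : Nat) (text : String) (r : Nat), r < fillers.length → s ≤ fuel →
      (∀ s' : Nat, s' < s →
        ((PySem.Str.split₀ text).length : Int) + (((cycTake fillers r s').map wcW).sum : Int) < min_words) →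
      (min_words ≤ ((PySem.Str.split₀ text).length : Int) + (((cycTake fillers r s).map wcW).sum : Int)) →
      ensureLoopA min_words fillers fuel text (r : Int) = appendPad text (cycTake fillers r s) := by
  intro s
  induction s with
  | zero =>
    intro fuel text r hr hfuel hmin hsat
    have hstop : ¬ ((PySem.Str.split₀ text).length : Int) < min_words := by
      simp only [cycTake, List.map_nil, List.sum_nil, Nat.cast_zero, add_zero] at hsat
      omega
    cases fuel <;> simp [ensureLoopA, hstop, appendPad, cycTake]
  | succ s ih =>
    intro fuel text r hr hfuel hmin hsat
    have hcnt : ((PySem.Str.split₀ text).length : Int) < min_words := by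
      have := hmin 0 (by omega)
      simpa [cycTake] using this
    obtain ⟨fuel', rfl⟩ : ∃ f', fuel = f' + 1 := ⟨fuel - 1, by omega⟩
    simp only [ensureLoopA, hcnt, if_true]
    have hidx : (if (fillers.length : Int) ≤ (r : Int) then (0:Int) else (r : Int)) = (r : Int) := by
      rw [if_neg]
      exact_mod_cast Nat.not_le.mpr hr
    rw [hidx]
    have hget : PySem.List.pyGet? fillers (r : Int) = some fillers[r] := by
      exact PySem.List.pyGet?_eq_some_getElem fillers (i := (r : Int)) (by positivity)
        (by exact_mod_cast hr)
    rw [hget]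
    set f := fillers[r] with hf
    set r' := (r + 1) % fillers.length with hr'
    have hr'lt : r' < fillers.length := Nat.mod_lt _ (by omega)
    have hgetD : fillers.getD r "" = f := List.getD_eq_getElem fillers "" hr
    have hcycsucc : ∀ s'' : Nat, cycTake fillers r (s''+1) = f :: cycTake fillers r' s'' := by
      intro s''
      simp only [cycTake]
      rw [hgetD, ← hr']
    have hsplit : (PySem.Str.split₀ (text ++ " " ++ f)).length
        = (PySem.Str.split₀ text).length + wcW f := by
      rw [str_split0_append]; simp [wcW]
    have hstep : ensureLoopA min_words fillers fuel' (text ++ " " ++ f) ((r : Int) + 1)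
        = ensureLoopA min_words fillers fuel' (text ++ " " ++ f) (r' : Int) := by
      by_cases hcase : r + 1 < fillers.length
      · have : r' = r + 1 := Nat.mod_eq_of_lt hcase
        rw [this]; push_cast; rfl
      · have hrm : r + 1 = fillers.length := by omega
        have : r' = 0 := by rw [hr', hrm]; exact Nat.mod_self _
        rw [this]
        have : ((r : Int) + 1) = (fillers.length : Int) := by exact_mod_cast congrArg Nat.cast hrm
        rw [this, loopA_idx_m]
        rfl
    show ensureLoopA min_words fillers fuel' (text ++ " " ++ f) ((r : Int) + 1)
        = appendPad text (cycTake fillers r (s + 1))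
    rw [hstep]
    have hmain := ih fuel' (text ++ " " ++ f) r' hr'lt (by omega)
      (by
        intro s' hs'
        have := hmin (s' + 1) (by omega)
        rw [hcycsucc s'] at this
        simp only [List.map_cons, List.sum_cons] at this
        rw [hsplit]
        push_cast at this ⊢
        omega)
      (by
        have := hsat
        rw [hcycsucc s] at this
        simp only [List.map_cons, List.sum_cons] at this
        rw [hsplit]
        push_cast at this ⊢
        omega)
    rw [hmain, hcycsucc s]
    rfl

-- the padding branch: A's loop output and its word count, in closed form
theorem pad_branch (text : String) (min_words : Int) (fillers : List String)
    (f0 : String) (hf0 : f0 ∈ fillers) (hf0ne : PySem.Str.split₀ f0 ≠ [])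
    (h2 : ¬ min_words ≤ ((PySem.Str.split₀ text).length : Int)) :
    ∃ k : Nat, 0 < k ∧
      ensureLoopA min_words fillers ((min_words.toNat + 1) * (fillers.length + 1)) text 0
        = appendPad text (cycTake fillers 0 k) ∧
      cycTake fillers 0 k
        = PySem.List.pyRepeat fillers
            (PySem.Int.floordiv (min_words - ((PySem.Str.split₀ text).length : Int) - 1)
              (((fillers.map wcW).sum : Nat) : Int))
          ++ PySem.List.slice fillers none
              (some ((firstJ (fillers.map wcW)
                (PySem.Int.mod (min_words - ((PySem.Str.split₀ text).length : Int) - 1)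
                  (((fillers.map wcW).sum : Nat) : Int) + 1) 0).2 : Int)) ∧
      ((PySem.Str.split₀ (appendPad text (cycTake fillers 0 k))).length : Int)
        = ((PySem.Str.split₀ text).length : Int)
          + PySem.Int.floordiv (min_words - ((PySem.Str.split₀ text).length : Int) - 1)
              (((fillers.map wcW).sum : Nat) : Int) * (((fillers.map wcW).sum : Nat) : Int)
          + ((firstJ (fillers.map wcW)
              (PySem.Int.mod (min_words - ((PySem.Str.split₀ text).length : Int) - 1)
                (((fillers.map wcW).sum : Nat) : Int) + 1) 0).1 : Int) := by
  set N : Nat := (PySem.Str.split₀ text).length with hN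
  set lN : List Nat := fillers.map wcW with hlN
  set m : Nat := fillers.length with hm_def
  have hm : 0 < m := List.length_pos_of_mem hf0
  have hcycN : 0 < lN.sum := by
    have h1 : wcW f0 ∈ lN := List.mem_map_of_mem hf0
    have h2' : 1 ≤ wcW f0 := by
      simp only [wcW]
      exact List.length_pos_of_ne_nil hf0ne
    have := List.le_sum_of_mem h1
    omega
  set C : Int := ((lN.sum : Nat) : Int) with hC
  have hC0 : 0 < C := by rw [hC]; exact_mod_cast hcycN
  set d : Int := min_words - (N : Int) - 1 with hd
  have hd0 : 0 ≤ d := by omega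
  set q : Int := PySem.Int.floordiv d C with hq
  set r : Int := PySem.Int.mod d C with hr
  have hq0 : 0 ≤ q := by
    rw [hq]
    exact (PySem.Int.le_floordiv_iff_mul_le hC0).mpr (by omega)
  have hr0 : 0 ≤ r := PySem.Int.mod_nonneg d hC0
  have hrC : r < C := PySem.Int.mod_lt d hC0
  have hid : q * C + r = d := PySem.Int.floordiv_mul_add_mod d C
  set rem : Int := r + 1 with hrem
  set J : Nat := (firstJ lN rem 0).2 with hJ
  set ACC : Nat := (firstJ lN rem 0).1 with hACC_def
  have hJm : J ≤ m := by
    have := firstJ_le lN rem 0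
    simpa [hlN, hm_def] using this
  have hACC : ACC = (lN.take J).sum := by
    have := firstJ_acc lN rem 0
    simpa [hACC_def, hJ] using this
  have hge : rem ≤ (ACC : Int) := by
    apply firstJ_ge
    rw [Nat.cast_zero, zero_add, ← hC]
    omega
  have hminJ : ∀ j' : Nat, j' < J → (((lN.take j').sum : Nat) : Int) < rem := by
    intro j' hj'
    have := firstJ_min lN rem 0 j' hj'
    simpa using this
  have hqk : ((q.toNat : Nat) : Int) = q := Int.toNat_of_nonneg hq0
  set k : Nat := q.toNat * m + J with hk
  -- per-block word counts of the cyclic prefix, cast to Int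
  have hsum : ∀ a b : Nat, b ≤ m →
      (((cycTake fillers 0 (a * m + b)).map wcW).sum : Int)
        = (a : Int) * C + (((lN.take b).sum : Nat) : Int) := by
    intro a b hb
    rw [sum_wc_blocks fillers hm a b hb, List.map_take, Nat.cast_add, Nat.cast_mul, ← hlN, ← hC]
  -- the loop needs exactly k appends
  have hpad := loopA_pad min_words fillers k ((min_words.toNat + 1) * (m + 1)) text 0 hm
    (by
      -- fuel bound: k ≤ (min_words.toNat + 1) * (m + 1)
      have hqd : q ≤ d := by nlinarith
      have hMpos : 0 < min_words := by omega
      have hqM : q.toNat ≤ min_words.toNat := by omega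
      calc k = q.toNat * m + J := hk
        _ ≤ min_words.toNat * m + m := Nat.add_le_add (Nat.mul_le_mul_right m hqM) hJm
        _ ≤ (min_words.toNat + 1) * (m + 1) := by nlinarith)
    (by
      intro s' hs'
      have hb : s' % m < m := Nat.mod_lt _ hm
      have hdm : s' / m * m + s' % m = s' := by
        have h := Nat.div_add_mod s' m
        rw [Nat.mul_comm] at h
        exact h
      have hrw : ((List.map wcW (cycTake fillers 0 s')).sum : Int)
          = ((s' / m : Nat) : Int) * C + (((lN.take (s' % m)).sum : Nat) : Int) := by
        conv_lhs => rw [← hdm]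
        exact hsum _ _ (le_of_lt hb)
      rw [hrw]
      have hale : s' / m ≤ q.toNat := by
        have hlt : s' < (q.toNat + 1) * m := by
          have : J ≤ m := hJm
          calc s' < k := hs'
            _ = q.toNat * m + J := hk
            _ ≤ q.toNat * m + m := by omega
            _ = (q.toNat + 1) * m := by ring
        exact Nat.lt_succ_iff.mp ((Nat.div_lt_iff_lt_mul hm).mpr hlt)
      rcases Nat.lt_or_ge (s' / m) q.toNat with hcase | hcase
      · -- strictly fewer full cycles
        have hpref : (lN.take (s' % m)).sum ≤ lN.sum := by
          have := List.sum_take_add_sum_drop lN (s' % m)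
          omega
        have hmul : ((s' / m : Nat) : Int) * C + C ≤ (q.toNat : Int) * C := by
          have h1 : ((s' / m : Nat) : Int) + 1 ≤ (q.toNat : Int) := by exact_mod_cast hcase
          nlinarith
        have hqC : (q.toNat : Int) * C = q * C := by rw [hqk]
        rw [hqC] at hmul
        have hprefC : (((lN.take (s' % m)).sum : Nat) : Int) ≤ C := by
          rw [hC]
          exact_mod_cast hpref
        linarith
      · -- same number of full cycles, shorter prefix
        have haq : s' / m = q.toNat := Nat.le_antisymm hale hcase
        have hbJ : s' % m < J := by
          have h' := hdm
          rw [haq] at h'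
          have h3 : q.toNat * m + s' % m < q.toNat * m + J := by
            rw [h']
            exact hk ▸ hs'
          exact Nat.lt_of_add_lt_add_left h3
        have := hminJ (s' % m) hbJ
        have hqC : ((s' / m : Nat) : Int) * C = q * C := by rw [haq, hqk]
        rw [hqC]
        linarith)
    (by
      have hrw : ((List.map wcW (cycTake fillers 0 k)).sum : Int)
          = (q.toNat : Int) * C + (((lN.take J).sum : Nat) : Int) := hsum q.toNat J hJm
      rw [hrw, hqk, ← hACC]
      linarith)
  refine ⟨k, ?_, ?_, ?_, ?_⟩
  · -- k > 0
    rcases Nat.eq_zero_or_pos k with hk0 | hk0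
    · exfalso
      have hJ0 : J = 0 := by omega
      rw [hACC, hJ0] at hge
      simp at hge
      omega
    · exact hk0
  · simpa using hpad
  · rw [cycTake_blocks fillers hm q.toNat J hJm]
    simp only [PySem.List.pyRepeat, PySem.List.slice_to_natCast]
  · rw [wc_appendPad, Nat.cast_add]
    rw [hsum q.toNat J hJm, hqk, ← hACC]
    ring

theorem main_eq (text : String) (min_words max_words : Int) (fillers : List String)
    (hpre : Pre_ensure_bounds text min_words max_words fillers) :
    ensure_bounds text min_words max_words fillers
      = ensure_bounds_alt text min_words max_words fillers := by
  have trim_eq : ∀ t : String,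
      (if !(PySem.Str.endswith
            (PySem.Str.join " " (PySem.List.slice (PySem.Str.split₀ t) none (some max_words))) ".") then
          PySem.Str.join " " (PySem.List.slice (PySem.Str.split₀ t) none (some max_words)) ++ "."
        else PySem.Str.join " " (PySem.List.slice (PySem.Str.split₀ t) none (some max_words))) =
        trimB t max_words := by
    intro t
    have flip : ∀ (b : Bool) (out : String),
        (if !b then out ++ "." else out) = if b then out else out ++ "." := by
      intro b out; cases b <;> rfl
    exact flip _ _
  have loop_stop : ∀ (fuel : Nat) (t : String) (idx : Int),
      ¬ ((PySem.Str.split₀ t).length : Int) < min_words →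
      ensureLoopA min_words fillers fuel t idx = t := by
    intro fuel t idx h
    cases fuel <;> simp [ensureLoopA, h]
  simp only [ensure_bounds, ensureGoA, ensure_bounds_alt]
  by_cases h1 : ((PySem.Str.split₀ text).length : Int) > max_words
  · simp only [h1, if_true]
    exact trim_eq text
  · simp only [h1, if_false]
    by_cases h2 : min_words ≤ ((PySem.Str.split₀ text).length : Int)
    · have ht := loop_stop ((min_words.toNat + 1) * (fillers.length + 1)) text 0 (by omega)
      rw [ht]
      simp [h1, h2]
    · simp only [if_neg h2]
      -- strictly short text: Pre_ supplies a filler with at least one word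
      have hfill : ∃ f ∈ fillers, PySem.Str.split₀ f ≠ [] := by
        rcases hpre with h | h | h
        · omega
        · omega
        · exact h
      obtain ⟨f0, hf0, hf0ne⟩ := hfill
      obtain ⟨k, hk0, hloop, hpadshape, hcount⟩ := pad_branch text min_words fillers f0 hf0 hf0ne h2
      have hcounts_eq : fillers.map (fun f => ((PySem.Str.split₀ f).length : Int))
          = (fillers.map wcW).map (Nat.cast : Nat → Int) := by
        simp [wcW, List.map_map, Function.comp]
      have hcycle : (fillers.map (fun f => ((PySem.Str.split₀ f).length : Int))).sum
          = (((fillers.map wcW).sum : Nat) : Int) := by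
        rw [hcounts_eq]
        exact (Nat.cast_list_sum _).symm
      have hcycN : 0 < (fillers.map wcW).sum := by
        have h1' : wcW f0 ∈ fillers.map wcW := List.mem_map_of_mem hf0
        have h2' : 1 ≤ wcW f0 := by
          simp only [wcW]
          exact List.length_pos_of_ne_nil hf0ne
        have := List.le_sum_of_mem h1'
        omega
      have hC0 : (((fillers.map wcW).sum : Nat) : Int) ≠ 0 := by
        simp only [ne_eq, Nat.cast_eq_zero]
        omega
      rw [hcycle]
      simp only [PySem.Int.divmod?, if_neg hC0]
      have hfd : (min_words - ((PySem.Str.split₀ text).length : Int) - 1).fdiv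
          (((fillers.map wcW).sum : Nat) : Int)
          = PySem.Int.floordiv (min_words - ((PySem.Str.split₀ text).length : Int) - 1)
              (((fillers.map wcW).sum : Nat) : Int) := rfl
      have hfm : (min_words - ((PySem.Str.split₀ text).length : Int) - 1).fmod
          (((fillers.map wcW).sum : Nat) : Int)
          = PySem.Int.mod (min_words - ((PySem.Str.split₀ text).length : Int) - 1)
              (((fillers.map wcW).sum : Nat) : Int) := rfl
      rw [hfd, hfm, hcounts_eq]
      have hscan := scanB_firstJ (fillers.map wcW)
        (PySem.Int.mod (min_words - ((PySem.Str.split₀ text).length : Int) - 1)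
          (((fillers.map wcW).sum : Nat) : Int) + 1) 0 0
      rw [Nat.cast_zero] at hscan
      rw [hscan]
      simp only [zero_add]
      rw [hloop, hcount]
      rw [← hpadshape]
      -- pad is nonempty (k > 0), so the fold is one append of the join
      obtain ⟨k', rfl⟩ : ∃ k', k = k' + 1 := ⟨k - 1, by omega⟩
      have hcons : cycTake fillers 0 (k' + 1)
          = fillers.getD 0 "" :: cycTake fillers ((0+1) % fillers.length) k' := by
        simp only [cycTake]
      rw [hcons, appendPad_eq_join, ← hcons]
      by_cases h3 : ((PySem.Str.split₀ text).length : Int)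
          + PySem.Int.floordiv (min_words - ((PySem.Str.split₀ text).length : Int) - 1)
              (((fillers.map wcW).sum : Nat) : Int) * (((fillers.map wcW).sum : Nat) : Int)
          + ((firstJ (fillers.map wcW)
              (PySem.Int.mod (min_words - ((PySem.Str.split₀ text).length : Int) - 1)
                (((fillers.map wcW).sum : Nat) : Int) + 1) 0).1 : Int) ≤ max_words
      · rw [if_neg (not_lt.mpr h3), if_pos h3]
      · rw [if_pos (not_le.mp h3), if_pos (not_le.mp h3), if_neg h3]
        exact trim_eq _

-- ===== VERDICT (by name: the statement is the Claim_ definition above) =====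
theorem ensure_bounds_spec : Claim_equal_ensure_bounds := by
  intro text mi ma fil _ hpre
  exact (main_eq text mi ma fil hpre)
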